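-- pv_equiv track=rewrite | github.com/mleihs/metaverse-center | scripts/export_for_production.py | _collapse_multiline_insert
-- ===== SOURCE A (Python) =====
-- def _collapse_multiline_insert(parts: list[str]) -> str:
--     """Collapse a multi-line INSERT statement into a single line.
--
--     Replaces embedded newlines within string literals with \\n escape
--     sequences and converts affected strings to PostgreSQL E-string syntax.
--     """
--     # Join all parts with newline (preserving the original line breaks)
--     full = "\n".join(parts)
--
--     # Strategy: walk through the statement character by character,
--     # tracking whether we're inside a string literal. When we encounter
--     # a newline inside a string literal, replace it with \n.
--     result: list[str] = []
--     in_string = False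
--     has_embedded_newlines = False
--     string_start_idx = -1
--     i = 0
--
--     while i < len(full):
--         char = full[i]
--
--         if char == "'" and not in_string:
--             in_string = True
--             string_start_idx = len(result)
--             result.append(char)
--         elif char == "'" and in_string:
--             # Check for escaped quote ('')
--             if i + 1 < len(full) and full[i + 1] == "'":
--                 result.append("''")
--                 i += 2
--                 continue
--             else:
--                 in_string = False
--                 # If this string had embedded newlines, convert to E-string
--                 if has_embedded_newlines:
--                     result[string_start_idx] = "E'"
--                     has_embedded_newlines = False
--                 result.append(char)
--         elif char == "\n" and in_string:
--             result.append("\\n")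
--             has_embedded_newlines = True
--         elif char == "\n" and not in_string:
--             # Newline outside string — just skip (collapse to single line)
--             pass
--         else:
--             result.append(char)
--
--         i += 1
--
--     return "".join(result)
-- ===== SOURCE B (Python) =====
-- def _collapse_multiline_insert(parts: list[str]) -> str:
--     """Collapse a multi-line INSERT statement into a single line (region-based)."""
--     rest = "\n".join(parts)
--     out = []
--     while True:
--         pre, sep, rest = rest.partition("'")
--         out.append(pre.replace("\n", ""))
--         if not sep:
--             return "".join(out)
--         body, closed, rest = _read_literal(rest)
--         lit = "'" + body + ("'" if closed else "")
--         if "\n" in lit: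
--             lit = lit.replace("\n", "\\n")
--             if closed:
--                 lit = "E" + lit
--         out.append(lit)
--
--
-- def _read_literal(s: str):
--     """Scan a literal body (text after an opening quote); return (body, closed, rest)."""
--     buf = []
--     i, n = 0, len(s)
--     while i < n:
--         c = s[i]
--         if c != "'":
--             buf.append(c)
--             i += 1
--         elif i + 1 < n and s[i + 1] == "'":
--             buf.append("''")
--             i += 2
--         else:
--             return "".join(buf), True, s[i + 1:]
--     return "".join(buf), False, ""
-- ===== Notes on version B (the rewrite author's own statement) =====
-- stated objective: faster
-- what changed: Replaces A's per-character in_string state machine (with retroactive mutation of the already-emitted opening quote) by region scanning: split at the next quote, consume one whole literal at a time, then emit each region reformatted in one piece (newlines stripped outside literals, escaped inside, E-prefix decided per literal).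
import Mathlib
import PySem

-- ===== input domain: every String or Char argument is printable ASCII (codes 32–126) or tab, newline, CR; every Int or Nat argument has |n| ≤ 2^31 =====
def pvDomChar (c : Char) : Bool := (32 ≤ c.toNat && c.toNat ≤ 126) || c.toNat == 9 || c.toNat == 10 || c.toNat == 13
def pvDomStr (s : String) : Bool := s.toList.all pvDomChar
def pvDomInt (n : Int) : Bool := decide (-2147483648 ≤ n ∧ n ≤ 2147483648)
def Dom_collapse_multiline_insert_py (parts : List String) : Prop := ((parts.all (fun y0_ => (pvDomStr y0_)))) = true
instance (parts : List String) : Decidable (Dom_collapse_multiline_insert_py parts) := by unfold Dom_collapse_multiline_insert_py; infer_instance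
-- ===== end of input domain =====

-- B replaces A's per-character in_string state machine by region scanning (split at the
-- next quote, consume one whole literal, emit it reformatted in bulk string operations); objective: faster (constant factor).

-- ===== PORT A =====
-- "".join(result), as chars
def pvJoin (res : List String) : List Char := (res.map String.toList).flatten

-- A's character-by-character while loop; state = (result, in_string, has_embedded_newlines, string_start_idx)
def pvALoop : List Char → List String → Bool → Bool → Int → List String
  | [], res, _inS, _h, _idx => res
  | c :: rest, res, inS, h, idx =>
    if c = '\'' && !inS then
      pvALoop rest (res ++ ["'"]) true h (Int.ofNat res.length)
    else if c = '\'' && inS then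
      match hr : rest with
      | '\'' :: rest2 => pvALoop rest2 (res ++ ["''"]) inS h idx  -- escaped quote, i += 2
      | _ =>
        -- idx ≥ 0 whenever h = true (result[string_start_idx] with idx = -1 is unreachable), so .toNat is exact
        let res' := if h then res.set idx.toNat "E'" else res
        pvALoop rest (res' ++ ["'"]) false false idx
    else if c = '\n' && inS then
      pvALoop rest (res ++ ["\\n"]) inS true idx
    else if c = '\n' && !inS then
      pvALoop rest res inS h idx
    else
      pvALoop rest (res ++ [String.ofList [c]]) inS h idx
  termination_by l _ _ _ _ => l.length
  decreasing_by all_goals simp_all <;> omega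

def collapse_multiline_insert_py (parts : List String) : String :=
  String.ofList (pvJoin (pvALoop (String.intercalate "\n" parts).toList [] false false (-1)))

-- ===== PORT B =====
-- pre.replace("\n", ""): exact, the pattern is a single character
def pvStripNL (l : List Char) : List Char := l.filter (· ≠ '\n')
-- lit.replace("\n", "\\n"): exact, the pattern is a single character
def pvEscNL (l : List Char) : List Char := l.flatMap (fun c => if c = '\n' then ['\\', 'n'] else [c])

-- _read_literal: scan a literal body after the opening quote → (body, closed, rest)
def pvReadLit : List Char → List Char × Bool × List Char
  | [] => ([], false, [])
  | c :: rest =>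
    if c ≠ '\'' then
      (c :: (pvReadLit rest).1, (pvReadLit rest).2.1, (pvReadLit rest).2.2)
    else
      match rest with
      | '\'' :: rest2 =>
        ('\'' :: '\'' :: (pvReadLit rest2).1, (pvReadLit rest2).2.1, (pvReadLit rest2).2.2)
      | _ => ([], true, rest)

theorem pvReadLit_rest_le (l : List Char) : (pvReadLit l).2.2.length ≤ l.length := by
  fun_induction pvReadLit l <;> simp_all <;> omega

-- format one scanned literal: close it if it closed, escape newlines, E-prefix when closed
def pvLit (r : List Char × Bool × List Char) : List Char :=
  let lit := '\'' :: r.1 ++ (if r.2.1 then ['\''] else [])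
  if '\n' ∈ lit then (if r.2.1 then 'E' :: pvEscNL lit else pvEscNL lit) else lit

-- B's main while loop; rest.partition("'") = (takeWhile, found?, tail of dropWhile)
def pvChunks (s : List Char) : List Char :=
  if s.dropWhile (· ≠ '\'') = [] then pvStripNL (s.takeWhile (· ≠ '\''))
  else
    pvStripNL (s.takeWhile (· ≠ '\''))
      ++ pvLit (pvReadLit (s.dropWhile (· ≠ '\'')).tail)
      ++ pvChunks (pvReadLit (s.dropWhile (· ≠ '\'')).tail).2.2
  termination_by s.length
  decreasing_by
    have h1 := pvReadLit_rest_le (s.dropWhile (· ≠ '\'')).tail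
    have h2 := s.length_dropWhile_le (· ≠ '\'')
    have h3 : (s.dropWhile (· ≠ '\'')).length ≠ 0 := by simp_all
    have h4 := List.length_tail (l := s.dropWhile (· ≠ '\''))
    omega

def collapse_multiline_insert_py_alt (parts : List String) : String :=
  String.ofList (pvChunks (String.intercalate "\n" parts).toList)

-- ===== PRECONDITION & SPEC =====
def Spec_collapse_multiline_insert_py (parts : List String) (out : String) : Prop := out = collapse_multiline_insert_py_alt parts
instance (parts : List String) (out : String) : Decidable (Spec_collapse_multiline_insert_py parts out) := by unfold Spec_collapse_multiline_insert_py; infer_instance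

-- ===== CLAIM (what is proved, stated in full; the proofs are below) =====
def Claim_equal_collapse_multiline_insert_py : Prop := ∀ (parts : List String), Dom_collapse_multiline_insert_py parts → Spec_collapse_multiline_insert_py parts (collapse_multiline_insert_py parts)

-- ===== LEMMAS AND PROOFS =====

theorem pvReadLit_cons_ne (c : Char) (h : ¬c = '\'') (rest : List Char) :
    pvReadLit (c :: rest) = (c :: (pvReadLit rest).1, (pvReadLit rest).2) := by
  rw [pvReadLit.eq_def]
  simp [h]

theorem pvJoin_append (a b : List String) : pvJoin (a ++ b) = pvJoin a ++ pvJoin b := by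
  simp [pvJoin]

theorem pvJoin_cons (s : String) (l : List String) : pvJoin (s :: l) = s.toList ++ pvJoin l := by
  simp [pvJoin]

theorem pvEscNL_cons_ne (c : Char) (h : c ≠ '\n') (l : List Char) :
    pvEscNL (c :: l) = c :: pvEscNL l := by simp [pvEscNL, h]

theorem pvEscNL_cons_quote (l : List Char) : pvEscNL ('\'' :: l) = '\'' :: pvEscNL l :=
  pvEscNL_cons_ne _ (by decide) _

theorem pvEscNL_cons_nl (l : List Char) : pvEscNL ('\n' :: l) = '\\' :: 'n' :: pvEscNL l := by
  simp [pvEscNL]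

theorem pvEscNL_append (a b : List Char) : pvEscNL (a ++ b) = pvEscNL a ++ pvEscNL b := by
  simp [pvEscNL]

theorem pvEscNL_of_not_mem (l : List Char) (h : '\n' ∉ l) : pvEscNL l = l := by
  induction l with
  | nil => rfl
  | cons c r ih =>
    rw [List.mem_cons] at h; push_neg at h
    rw [pvEscNL_cons_ne c (fun hc => h.1 hc.symm) r, ih h.2]

theorem set_append_cons (l1 l2 : List String) (x y : String) :
    (l1 ++ x :: l2).set l1.length y = l1 ++ y :: l2 := by
  induction l1 with
  | nil => rfl
  | cons a t ih => simp [ih]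

theorem pvReadLit_unclosed (l : List Char) (h : (pvReadLit l).2.1 = false) :
    (pvReadLit l).2.2 = [] := by
  fun_induction pvReadLit l <;> simp_all

-- pvChunks unfolding equations
theorem pvChunks_nil : pvChunks [] = [] := by
  rw [pvChunks.eq_def]; simp [pvStripNL]

theorem pvChunks_quote (r : List Char) :
    pvChunks ('\'' :: r) = pvLit (pvReadLit r) ++ pvChunks (pvReadLit r).2.2 := by
  rw [pvChunks.eq_def]; simp [pvStripNL]

theorem pvChunks_cons_ne (c : Char) (r : List Char) (h1 : c ≠ '\'') :
    pvChunks (c :: r) = pvStripNL [c] ++ pvChunks r := by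
  conv_lhs => rw [pvChunks.eq_def]
  conv_rhs => rw [pvChunks.eq_def]
  by_cases hcn : c = '\n' <;>
    by_cases hd : List.dropWhile (fun x => !decide (x = '\'')) r = [] <;>
      simp [h1, hcn, hd, pvStripNL]

-- one literal region, reshaped to the form A produces
theorem pvLit_spec (l : List Char) :
    pvLit (pvReadLit l) ++ pvChunks (pvReadLit l).2.2 =
      (if (pvReadLit l).2.1 then
        (if decide ('\n' ∈ (pvReadLit l).1) then ['E', '\''] else ['\''])
          ++ pvEscNL (pvReadLit l).1 ++ ['\''] ++ pvChunks (pvReadLit l).2.2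
      else ['\''] ++ pvEscNL (pvReadLit l).1) := by
  have hq : pvEscNL ['\''] = ['\''] := rfl
  cases hc : (pvReadLit l).2.1 <;> by_cases hm : '\n' ∈ (pvReadLit l).1
  · rw [pvReadLit_unclosed l hc, pvChunks_nil]
    simp [pvLit, hc, hm, pvEscNL_cons_quote]
  · rw [pvReadLit_unclosed l hc, pvChunks_nil]
    simp [pvLit, hc, hm, pvEscNL_of_not_mem _ hm]
  · simp [pvLit, hc, hm, pvEscNL_append, pvEscNL_cons_quote, hq]
  · simp [pvLit, hc, hm, pvEscNL_append, pvEscNL_cons_quote, hq,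
      pvEscNL_of_not_mem _ hm]

-- the two statements of the joint induction: A's loop outside/inside a string literal
def pvOut (s : List Char) : Prop :=
  ∀ (res : List String) (idx : Int),
    pvJoin (pvALoop s res false false idx) = pvJoin res ++ pvChunks s

def pvIn (s : List Char) : Prop :=
  ∀ (res0 mid : List String) (h : Bool),
    pvJoin (pvALoop s (res0 ++ "'" :: mid) true h (Int.ofNat res0.length)) =
      pvJoin res0 ++
        (if (pvReadLit s).2.1 then
          (if h || decide ('\n' ∈ (pvReadLit s).1) then ['E', '\''] else ['\'']) ++ pvJoin mid
            ++ pvEscNL (pvReadLit s).1 ++ ['\''] ++ pvChunks (pvReadLit s).2.2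
        else ['\''] ++ pvJoin mid ++ pvEscNL (pvReadLit s).1)

theorem pv_main : ∀ (n : Nat) (s : List Char), s.length ≤ n → pvOut s ∧ pvIn s := by
  intro n
  induction n with
  | zero =>
    intro s hs
    have hnil : s = [] := List.length_eq_zero_iff.mp (Nat.le_zero.mp hs)
    subst hnil
    constructor
    · intro res idx; simp [pvALoop, pvChunks_nil]
    · intro res0 mid h
      simp [pvALoop, pvReadLit, pvJoin_append, pvJoin_cons, pvEscNL]
  | succ n ih =>
    intro s hs
    cases s with
    | nil =>
      constructor
      · intro res idx; simp [pvALoop, pvChunks_nil]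
      · intro res0 mid h
        simp [pvALoop, pvReadLit, pvJoin_append, pvJoin_cons, pvEscNL]
    | cons c rest =>
      have hrest : rest.length ≤ n := by simp at hs; omega
      constructor
      · -- OUT
        intro res idx
        by_cases hq : c = '\''
        · subst hq
          have hstep : pvALoop ('\'' :: rest) res false false idx
              = pvALoop rest (res ++ ["'"]) true false (Int.ofNat res.length) := by
            rw [pvALoop.eq_def]; simp
          have hin := (ih rest hrest).2 res [] false
          rw [hstep, pvChunks_quote, pvLit_spec]
          simpa [pvJoin] using hin
        · by_cases hn : c = '\n'
          · subst hn
            have hstep : pvALoop ('\n' :: rest) res false false idx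
                = pvALoop rest res false false idx := by
              rw [pvALoop.eq_def]; simp
            rw [hstep, pvChunks_cons_ne _ _ hq, (ih rest hrest).1 res idx]
            simp [pvStripNL]
          · have hstep : pvALoop (c :: rest) res false false idx
                = pvALoop rest (res ++ [String.ofList [c]]) false false idx := by
              rw [pvALoop.eq_def]; simp [hq, hn]
            rw [hstep, pvChunks_cons_ne _ _ hq, (ih rest hrest).1 (res ++ [String.ofList [c]]) idx]
            simp [pvJoin_append, pvJoin, pvStripNL, hn]
      · -- IN
        intro res0 mid h
        by_cases hq : c = '\''
        · subst hq
          cases rest with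
          | nil =>
            -- closing quote at end of input
            have hstep : pvALoop ['\''] (res0 ++ "'" :: mid) true h (Int.ofNat res0.length)
                = (if h then (res0 ++ "'" :: mid).set (Int.ofNat res0.length).toNat "E'"
                   else res0 ++ "'" :: mid) ++ ["'"] := by
              rw [pvALoop.eq_def]; simp [pvALoop]
            have htn : (Int.ofNat res0.length).toNat = res0.length := rfl
            rw [hstep]
            cases h <;>
              simp [pvReadLit, pvChunks_nil, pvJoin_append, pvJoin_cons, set_append_cons,
                htn, pvEscNL, pvJoin]
          | cons d rest2 =>
            by_cases hd : d = '\''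
            · subst hd
              have hrest2 : rest2.length ≤ n := by simp at hs; omega
              have hstep : pvALoop ('\'' :: '\'' :: rest2) (res0 ++ "'" :: mid) true h (Int.ofNat res0.length)
                  = pvALoop rest2 ((res0 ++ "'" :: mid) ++ ["''"]) true h (Int.ofNat res0.length) := by
                rw [pvALoop.eq_def]; simp
              have hin := (ih rest2 hrest2).2 res0 (mid ++ ["''"]) h
              rw [hstep]
              simp only [List.append_assoc, List.cons_append, List.nil_append] at hin ⊢
              rw [hin]
              cases hcl : (pvReadLit rest2).2.1 <;>
                simp [pvReadLit, hcl, pvJoin_append, pvJoin_cons, pvEscNL_cons_quote, pvJoin]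
            · -- closing quote, next char is not a quote
              have htn : (Int.ofNat res0.length).toNat = res0.length := rfl
              have hstep : pvALoop ('\'' :: d :: rest2) (res0 ++ "'" :: mid) true h (Int.ofNat res0.length)
                  = pvALoop (d :: rest2)
                      ((if h then (res0 ++ "'" :: mid).set (Int.ofNat res0.length).toNat "E'"
                        else res0 ++ "'" :: mid) ++ ["'"]) false false (Int.ofNat res0.length) := by
                rw [pvALoop.eq_def]; simp [hd]
              have hout := (ih (d :: rest2) hrest).1
                ((if h then (res0 ++ "'" :: mid).set (Int.ofNat res0.length).toNat "E'"
                  else res0 ++ "'" :: mid) ++ ["'"]) (Int.ofNat res0.length)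
              rw [hstep, hout]
              cases h <;>
                simp [pvReadLit, hd, pvJoin_append, pvJoin_cons, set_append_cons, htn, pvEscNL, pvJoin]
        · by_cases hn : c = '\n'
          · subst hn
            have hstep : pvALoop ('\n' :: rest) (res0 ++ "'" :: mid) true h (Int.ofNat res0.length)
                = pvALoop rest ((res0 ++ "'" :: mid) ++ ["\\n"]) true true (Int.ofNat res0.length) := by
              rw [pvALoop.eq_def]; simp
            have hin := (ih rest hrest).2 res0 (mid ++ ["\\n"]) true
            rw [hstep]
            simp only [List.append_assoc, List.cons_append, List.nil_append] at hin ⊢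
            rw [hin]
            cases hcl : (pvReadLit rest).2.1 <;>
              simp [pvReadLit_cons_ne _ hq, hcl, pvJoin_append, pvJoin_cons, pvEscNL_cons_nl, pvJoin]
          · have hstep : pvALoop (c :: rest) (res0 ++ "'" :: mid) true h (Int.ofNat res0.length)
                = pvALoop rest ((res0 ++ "'" :: mid) ++ [String.ofList [c]]) true h (Int.ofNat res0.length) := by
              rw [pvALoop.eq_def]; simp [hq, hn]
            have hin := (ih rest hrest).2 res0 (mid ++ [String.ofList [c]]) h
            rw [hstep]
            simp only [List.append_assoc, List.cons_append, List.nil_append] at hin ⊢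
            rw [hin]
            have hn' : ¬'\n' = c := fun hh => hn hh.symm
            cases hcl : (pvReadLit rest).2.1 <;>
              simp [pvReadLit_cons_ne _ hq, hcl, hn, hn', pvJoin_append, pvJoin_cons,
                pvEscNL_cons_ne c hn, pvJoin]

theorem pv_eq (s : List Char) :
    pvJoin (pvALoop s [] false false (-1)) = pvChunks s := by
  have := (pv_main s.length s le_rfl).1 [] (-1)
  simpa [pvJoin] using this

-- ===== VERDICT (by name: the statement is the Claim_ definition above) =====
theorem collapse_multiline_insert_py_spec : Claim_equal_collapse_multiline_insert_py := by
  intro parts _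
  unfold Spec_collapse_multiline_insert_py collapse_multiline_insert_py collapse_multiline_insert_py_alt
  rw [pv_eq]
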